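-- pv_equiv track=rewrite | github.com/KeYu-Red/CMPT419-726-Machine-Learning | Final Project/code/gbssl/preprocess.py | preprocess_label
-- ===== SOURCE A (Python) =====
-- def preprocess_label(data):
--     sent_set = []
--     sentence = []
--     for line in data:
--         if line.split():
--             sentence.append(tuple(line.split()))
--         else:
--             sent_set.append(sentence)
--             sentence = []
--
--     return sent_set
-- ===== SOURCE B (Python) =====
-- def preprocess_label(data):
--     sents = []
--     rest = list(data)
--     while True:
--         blank = next((i for i, l in enumerate(rest) if not l.split()), None)
--         if blank is None:
--             return sents
--         sents.append([tuple(l.split()) for l in rest[:blank]])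
--         rest = rest[blank + 1:]
-- ===== Notes on version B (the rewrite author's own statement) =====
-- stated objective: alternative
-- what changed: Instead of accumulating a running sentence line by line and flushing it on each blank, B repeatedly searches for the next blank line, maps split over the slice before it, and continues on the remainder after the blank (the trailing unterminated group is dropped naturally).
import Mathlib
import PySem

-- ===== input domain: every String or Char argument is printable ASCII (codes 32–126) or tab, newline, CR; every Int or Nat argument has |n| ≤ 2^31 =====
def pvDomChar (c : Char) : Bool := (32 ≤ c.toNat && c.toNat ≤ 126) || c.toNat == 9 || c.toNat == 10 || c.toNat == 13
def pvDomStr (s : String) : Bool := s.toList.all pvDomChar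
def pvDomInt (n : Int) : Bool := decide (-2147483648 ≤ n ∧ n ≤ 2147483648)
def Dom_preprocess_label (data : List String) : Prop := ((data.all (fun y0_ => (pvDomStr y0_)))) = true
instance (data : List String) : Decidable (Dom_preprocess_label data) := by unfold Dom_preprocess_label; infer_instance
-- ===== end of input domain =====

-- B replaces A's line-by-line accumulation of the current sentence by repeated
-- search for the next blank line, mapping split over the slice before it (alternative decomposition).


-- ===== PORT A =====
-- A: fold over the lines with state (sent_set, sentence); a non-blank line appends
-- its split to the current sentence, a blank line flushes the sentence.
def preprocess_label (data : List String) : List (List (List String)) :=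
  (data.foldl
    (fun st line =>
      if PySem.Str.split₀ line ≠ [] then (st.1, st.2 ++ [PySem.Str.split₀ line])
      else (st.1 ++ [st.2], []))
    ([], [])).1

-- ===== PORT B =====
-- Source B: next((i for i,l in enumerate(rest) if not l.split()), None) = findIdx? on rest;
-- rest[:blank] = take blank and rest[blank+1:] = drop (blank+1), exact since 0 ≤ blank ≤ len(rest).
def preprocess_label_alt (data : List String) : List (List (List String)) :=
  match h : data.findIdx? (fun l => PySem.Str.split₀ l == []) with
  | none => []
  | some i =>
      ((data.take i).map PySem.Str.split₀) :: preprocess_label_alt (data.drop (i + 1))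
termination_by data.length
decreasing_by
  have hi : i < data.length := (List.findIdx?_eq_some_iff_findIdx_eq.mp h).1
  simp only [List.length_drop]; omega

-- ===== PRECONDITION & SPEC =====
def Spec_preprocess_label (data : List String) (out : List (List (List String))) : Prop := out = preprocess_label_alt data
instance (data : List String) (out : List (List (List String))) : Decidable (Spec_preprocess_label data out) := by unfold Spec_preprocess_label; infer_instance

-- ===== CLAIM (what is proved, stated in full; the proofs are below) =====
def Claim_equal_preprocess_label : Prop := ∀ (data : List String), Dom_preprocess_label data → Spec_preprocess_label data (preprocess_label data)

-- ===== LEMMAS AND PROOFS =====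

-- A's loop, restructured as a recursion carrying only the current sentence.
def pvGoA (cur : List (List String)) : List String → List (List (List String))
  | [] => []
  | l :: t =>
      if PySem.Str.split₀ l ≠ [] then pvGoA (cur ++ [PySem.Str.split₀ l]) t
      else cur :: pvGoA [] t

theorem pvFoldA (t : List String) : ∀ (acc : List (List (List String))) (cur : List (List String)),
    (t.foldl
      (fun st line =>
        if PySem.Str.split₀ line ≠ [] then (st.1, st.2 ++ [PySem.Str.split₀ line])
        else (st.1 ++ [st.2], []))
      (acc, cur)).1 = acc ++ pvGoA cur t := by
  induction t with
  | nil => intro acc cur; simp [pvGoA]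
  | cons l t ih =>
      intro acc cur
      by_cases h : PySem.Str.split₀ l = []
      · rw [List.foldl_cons, if_neg (not_not_intro h), ih, pvGoA, if_neg (not_not_intro h)]
        simp
      · rw [List.foldl_cons, if_pos h, ih, pvGoA, if_pos h]

theorem pvGoA_step (t : List String) : ∀ (cur : List (List String)),
    pvGoA cur t =
      match t.findIdx? (fun l => PySem.Str.split₀ l == []) with
      | none => []
      | some i => (cur ++ (t.take i).map PySem.Str.split₀) :: pvGoA [] (t.drop (i + 1)) := by
  induction t with
  | nil => intro cur; simp [pvGoA]
  | cons l t ih =>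
      intro cur
      by_cases h : PySem.Str.split₀ l = []
      · simp [pvGoA, h, List.findIdx?_cons]
      · rw [pvGoA, if_pos h, ih]
        simp only [List.findIdx?_cons, h, beq_iff_eq]
        cases hf : t.findIdx? (fun l => PySem.Str.split₀ l == []) with
        | none => simp
        | some i => simp [List.take_succ_cons, List.drop_succ_cons, List.map_cons]

theorem pvGoA_alt (t : List String) : pvGoA [] t = preprocess_label_alt t := by
  induction hn : t.length using Nat.strong_induction_on generalizing t with
  | _ n ih =>
      rw [pvGoA_step, preprocess_label_alt]
      cases hf : t.findIdx? (fun l => PySem.Str.split₀ l == []) with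
      | none => rfl
      | some i =>
          have hi : i < t.length := (List.findIdx?_eq_some_iff_findIdx_eq.mp hf).1
          simp only [List.nil_append]
          rw [ih ((t.drop (i + 1)).length) (by simp; omega) _ rfl]

-- ===== VERDICT (by name: the statement is the Claim_ definition above) =====
theorem preprocess_label_spec : Claim_equal_preprocess_label := by
  intro data _
  unfold Spec_preprocess_label preprocess_label
  rw [pvFoldA, List.nil_append, pvGoA_alt]
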